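-- pv_equiv track=rewrite | github.com/HugoCaspoz/investai | apps/api/investai_api/services/market_data_service.py | _infer_crypto_themes
-- ===== SOURCE A (Python) =====
-- def _infer_crypto_themes(coin_id: str, symbol: str, name: str) -> list[str]:
--     fingerprint = f"{coin_id} {symbol} {name}".upper()
--     themes = ["crypto"]
--     if any(token in fingerprint for token in {"BTC", "BITCOIN"}):
--         themes.append("strong_narrative")
--     if any(token in fingerprint for token in {"ETH", "ETHEREUM", "LINK", "AAVE", "MKR", "ONDO", "ENA", "LDO"}):
--         themes.append("crypto_infra")
--     if any(token in fingerprint for token in {"SOL", "SUI", "SEI", "APT", "TAO", "INJ", "FET", "RENDER", "RNDR", "AIOZ"}):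
--         themes.extend(["growth", "strong_narrative"])
--     if any(token in fingerprint for token in {"TAO", "FET", "RENDER", "RNDR", "AIOZ", "ARKM"}):
--         themes.append("ai_software")
--     if any(token in fingerprint for token in {"ARB", "OP", "TIA", "SUI", "SEI", "APT", "NEAR"}):
--         themes.append("growth")
--     if "growth" not in themes and any(token in fingerprint for token in {"SOL", "ETH", "BTC"}):
--         themes.append("growth")
--     return sorted(set(themes))
-- ===== SOURCE B (Python) =====
-- # Single left-to-right scan of the fingerprint: every substring of a relevant
-- # length is looked up in a token->themes index (built by inverting A's rules,
-- # with A's deduplicating 'growth' fallback folded into the token entries).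
-- _TOKEN_THEMES = {
--     "BTC": ("strong_narrative", "growth"),
--     "BITCOIN": ("strong_narrative",),
--     "ETH": ("crypto_infra", "growth"),
--     "ETHEREUM": ("crypto_infra",),
--     "LINK": ("crypto_infra",),
--     "AAVE": ("crypto_infra",),
--     "MKR": ("crypto_infra",),
--     "ONDO": ("crypto_infra",),
--     "ENA": ("crypto_infra",),
--     "LDO": ("crypto_infra",),
--     "SOL": ("growth", "strong_narrative"),
--     "SUI": ("growth", "strong_narrative"),
--     "SEI": ("growth", "strong_narrative"),
--     "APT": ("growth", "strong_narrative"),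
--     "TAO": ("growth", "strong_narrative", "ai_software"),
--     "INJ": ("growth", "strong_narrative"),
--     "FET": ("growth", "strong_narrative", "ai_software"),
--     "RENDER": ("growth", "strong_narrative", "ai_software"),
--     "RNDR": ("growth", "strong_narrative", "ai_software"),
--     "AIOZ": ("growth", "strong_narrative", "ai_software"),
--     "ARKM": ("ai_software",),
--     "ARB": ("growth",),
--     "OP": ("growth",),
--     "TIA": ("growth",),
--     "NEAR": ("growth",),
-- }
--
-- _LENGTHS = (2, 3, 4, 6, 7, 8)  # the distinct token lengths
--
-- def _infer_crypto_themes(coin_id: str, symbol: str, name: str) -> list[str]: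
--     fingerprint = f"{coin_id} {symbol} {name}".upper()
--     result = {"crypto"}
--     for i in range(len(fingerprint)):
--         for length in _LENGTHS:
--             themes = _TOKEN_THEMES.get(fingerprint[i:i + length])
--             if themes is not None:
--                 result.update(themes)
--     return sorted(result)
-- ===== Notes on version B (the rewrite author's own statement) =====
-- stated objective: alternative
-- what changed: Instead of testing each hard-coded token for substring containment per theme branch, B scans the fingerprint once left-to-right and looks every substring of a relevant length up in a token->themes index (A's rules inverted into a dict, with the deduplicating 'growth' fallback folded into the token entries), accumulating themes into a set.
import Mathlib
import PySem

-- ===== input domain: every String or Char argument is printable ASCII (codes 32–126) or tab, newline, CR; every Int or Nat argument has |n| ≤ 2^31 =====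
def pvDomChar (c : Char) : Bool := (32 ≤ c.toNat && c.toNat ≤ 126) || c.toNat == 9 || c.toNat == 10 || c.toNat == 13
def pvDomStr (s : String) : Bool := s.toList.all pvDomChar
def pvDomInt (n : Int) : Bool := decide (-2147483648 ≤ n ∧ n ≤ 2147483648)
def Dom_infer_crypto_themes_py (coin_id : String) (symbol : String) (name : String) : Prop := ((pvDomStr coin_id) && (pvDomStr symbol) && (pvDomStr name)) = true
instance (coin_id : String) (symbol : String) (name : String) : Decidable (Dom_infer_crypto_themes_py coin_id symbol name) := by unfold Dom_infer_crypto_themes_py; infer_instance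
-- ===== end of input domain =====

-- B replaces A's per-token substring tests by a single left-to-right scan of the
-- fingerprint that looks every substring of a relevant length up in a
-- token -> themes index (alternative algorithm; same observable result).

-- ===== PORT A =====
def infer_crypto_themes_py (coin_id : String) (symbol : String) (name : String) : List String :=
  let fingerprint := PySem.Str.upper (coin_id ++ " " ++ symbol ++ " " ++ name)
  let themes := ["crypto"]
  let themes := if ["BTC", "BITCOIN"].any (fun token => PySem.Str.isIn token fingerprint) then themes ++ ["strong_narrative"] else themes
  let themes := if ["ETH", "ETHEREUM", "LINK", "AAVE", "MKR", "ONDO", "ENA", "LDO"].any (fun token => PySem.Str.isIn token fingerprint) then themes ++ ["crypto_infra"] else themes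
  let themes := if ["SOL", "SUI", "SEI", "APT", "TAO", "INJ", "FET", "RENDER", "RNDR", "AIOZ"].any (fun token => PySem.Str.isIn token fingerprint) then themes ++ ["growth", "strong_narrative"] else themes
  let themes := if ["TAO", "FET", "RENDER", "RNDR", "AIOZ", "ARKM"].any (fun token => PySem.Str.isIn token fingerprint) then themes ++ ["ai_software"] else themes
  let themes := if ["ARB", "OP", "TIA", "SUI", "SEI", "APT", "NEAR"].any (fun token => PySem.Str.isIn token fingerprint) then themes ++ ["growth"] else themes
  let themes := if (!(themes.contains "growth")) && (["SOL", "ETH", "BTC"].any (fun token => PySem.Str.isIn token fingerprint)) then themes ++ ["growth"] else themes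
  PySem.List.sorted (PySem.Set.ofList themes) (fun x => x) false

-- ===== PORT B =====
-- the _TOKEN_THEMES dict of Source B (insertion order kept)
def pvTTList : List (String × List String) :=
  [ ("BTC", ["strong_narrative", "growth"]),
    ("BITCOIN", ["strong_narrative"]),
    ("ETH", ["crypto_infra", "growth"]),
    ("ETHEREUM", ["crypto_infra"]),
    ("LINK", ["crypto_infra"]),
    ("AAVE", ["crypto_infra"]),
    ("MKR", ["crypto_infra"]),
    ("ONDO", ["crypto_infra"]),
    ("ENA", ["crypto_infra"]),
    ("LDO", ["crypto_infra"]),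
    ("SOL", ["growth", "strong_narrative"]),
    ("SUI", ["growth", "strong_narrative"]),
    ("SEI", ["growth", "strong_narrative"]),
    ("APT", ["growth", "strong_narrative"]),
    ("TAO", ["growth", "strong_narrative", "ai_software"]),
    ("INJ", ["growth", "strong_narrative"]),
    ("FET", ["growth", "strong_narrative", "ai_software"]),
    ("RENDER", ["growth", "strong_narrative", "ai_software"]),
    ("RNDR", ["growth", "strong_narrative", "ai_software"]),
    ("AIOZ", ["growth", "strong_narrative", "ai_software"]),
    ("ARKM", ["ai_software"]),
    ("ARB", ["growth"]),
    ("OP", ["growth"]),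
    ("TIA", ["growth"]),
    ("NEAR", ["growth"]) ]

def pvTokenThemes : PySem.Dict String (List String) := PySem.Dict.ofList pvTTList

def pvLengths : List Int := [2, 3, 4, 6, 7, 8]

def infer_crypto_themes_py_alt (coin_id : String) (symbol : String) (name : String) : List String :=
  let fingerprint := PySem.Str.upper (coin_id ++ " " ++ symbol ++ " " ++ name)
  let result := (PySem.List.pyRange 0 (PySem.Str.len fingerprint)).foldl
    (fun acc i =>
      pvLengths.foldl
        (fun acc length =>
          match pvTokenThemes.get? (PySem.Str.slice fingerprint (some i) (some (i + length))) with
          | some themes => PySem.Set.update acc themes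
          | none => acc)
        acc)
    (PySem.Set.ofList ["crypto"])
  PySem.List.sorted result (fun x => x) false

-- ===== PRECONDITION & SPEC =====
def Spec_infer_crypto_themes_py (coin_id : String) (symbol : String) (name : String) (out : List String) : Prop := out = infer_crypto_themes_py_alt coin_id symbol name
instance (coin_id : String) (symbol : String) (name : String) (out : List String) : Decidable (Spec_infer_crypto_themes_py coin_id symbol name out) := by unfold Spec_infer_crypto_themes_py; infer_instance

-- ===== CLAIM (what is proved, stated in full; the proofs are below) =====
def Claim_equal_infer_crypto_themes_py : Prop := ∀ (coin_id : String) (symbol : String) (name : String), Dom_infer_crypto_themes_py coin_id symbol name → Spec_infer_crypto_themes_py coin_id symbol name (infer_crypto_themes_py coin_id symbol name)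

-- ===== LEMMAS AND PROOFS =====

-- membership in the inner fold over the candidate lengths
theorem pvMemFoldlLookup (f : Int → Option (List String)) (l : List Int) (acc : PySem.Set String) (x : String) :
    x ∈ l.foldl (fun acc L => match f L with | some th => PySem.Set.update acc th | none => acc) acc ↔
      x ∈ acc ∨ ∃ L ∈ l, ∃ th, f L = some th ∧ x ∈ th := by
  induction l generalizing acc with
  | nil => simp
  | cons L tl ih =>
    simp only [List.foldl_cons, List.mem_cons]
    cases hf : f L with
    | none =>
      rw [ih]
      constructor
      · rintro (h | ⟨L', hL', th, hth, hx⟩)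
        · exact Or.inl h
        · exact Or.inr ⟨L', Or.inr hL', th, hth, hx⟩
      · rintro (h | ⟨L', (rfl | hL'), th, hth, hx⟩)
        · exact Or.inl h
        · simp [hf] at hth
        · exact Or.inr ⟨L', hL', th, hth, hx⟩
    | some th =>
      rw [ih]
      simp only [PySem.Set.mem_update]
      constructor
      · rintro ((h | h) | ⟨L', hL', th', hth', hx⟩)
        · exact Or.inl h
        · exact Or.inr ⟨L, Or.inl rfl, th, hf, h⟩
        · exact Or.inr ⟨L', Or.inr hL', th', hth', hx⟩
      · rintro (h | ⟨L', (rfl | hL'), th', hth', hx⟩)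
        · exact Or.inl (Or.inl h)
        · rw [hf] at hth'; cases hth'; exact Or.inl (Or.inr hx)
        · exact Or.inr ⟨L', hL', th', hth', hx⟩

theorem pvNodupFoldlLookup (f : Int → Option (List String)) (l : List Int) (acc : PySem.Set String)
    (h : acc.Nodup) :
    (l.foldl (fun acc L => match f L with | some th => PySem.Set.update acc th | none => acc) acc).Nodup := by
  induction l generalizing acc with
  | nil => exact h
  | cons L tl ih =>
    simp only [List.foldl_cons]
    cases hf : f L with
    | none => exact ih acc h
    | some th => exact ih _ (PySem.Set.nodup_update acc th h)

-- membership in the outer scan over the positions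
theorem pvMemFoldlScan (f : Int → Int → Option (List String)) (l : List Int) (acc : PySem.Set String) (x : String) :
    x ∈ l.foldl (fun acc i =>
        pvLengths.foldl (fun acc L => match f i L with | some th => PySem.Set.update acc th | none => acc) acc) acc ↔
      x ∈ acc ∨ ∃ i ∈ l, ∃ L ∈ pvLengths, ∃ th, f i L = some th ∧ x ∈ th := by
  induction l generalizing acc with
  | nil => simp
  | cons i tl ih =>
    simp only [List.foldl_cons, List.mem_cons]
    rw [ih, pvMemFoldlLookup]
    constructor
    · rintro ((h | ⟨L, hL, th, hth, hx⟩) | ⟨i', hi', rest⟩)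
      · exact Or.inl h
      · exact Or.inr ⟨i, Or.inl rfl, L, hL, th, hth, hx⟩
      · exact Or.inr ⟨i', Or.inr hi', rest⟩
    · rintro (h | ⟨i', (rfl | hi'), rest⟩)
      · exact Or.inl (Or.inl h)
      · exact Or.inl (Or.inr rest)
      · exact Or.inr ⟨i', hi', rest⟩

theorem pvNodupFoldlScan (f : Int → Int → Option (List String)) (l : List Int) (acc : PySem.Set String)
    (h : acc.Nodup) :
    (l.foldl (fun acc i =>
        pvLengths.foldl (fun acc L => match f i L with | some th => PySem.Set.update acc th | none => acc) acc) acc).Nodup := by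
  induction l generalizing acc with
  | nil => exact h
  | cons i tl ih => exact ih _ (pvNodupFoldlLookup _ _ _ h)

theorem pvItems : pvTokenThemes.items = pvTTList := by rfl

theorem pvKeysNodup : pvTokenThemes.keys.Nodup := by decide

theorem pvLookupIff (k : String) (th : List String) :
    pvTokenThemes.get? k = some th ↔ (k, th) ∈ pvTTList := by
  rw [← pvItems]
  exact PySem.Dict.get?_eq_some_iff_mem_items _ _ _ pvKeysNodup

theorem pvTokProps : ∀ p ∈ pvTTList, p.1.toList ≠ [] ∧ ((p.1.toList.length : Int) ∈ pvLengths) := by decide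

-- a token occurs as one of the scanned slices iff it is a substring
theorem pvSliceIff (t s : String) (ht : t.toList ≠ []) (hlen : (t.toList.length : Int) ∈ pvLengths) :
    (∃ i ∈ PySem.List.pyRange 0 (PySem.Str.len s), ∃ L ∈ pvLengths,
        PySem.Str.slice s (some i) (some (i + L)) = t) ↔ PySem.Str.isIn t s = true := by
  constructor
  · rintro ⟨i, hi, L, hL, hsl⟩
    rw [PySem.List.mem_pyRange_one] at hi
    have h0L : 0 < L := by fin_cases hL <;> norm_num
    obtain ⟨j, rfl⟩ : ∃ j : Nat, i = (j : Int) := ⟨i.toNat, (Int.toNat_of_nonneg hi.1).symm⟩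
    obtain ⟨m, rfl⟩ : ∃ m : Nat, L = (m : Int) := ⟨L.toNat, (Int.toNat_of_nonneg (le_of_lt h0L)).symm⟩
    have hlist := congrArg String.toList hsl
    rw [PySem.Str.toList_slice, PySem.Chars.slice_eq_listSlice, PySem.List.slice_natCast_add] at hlist
    have hpre : t.toList <+: List.drop j s.toList := by
      rw [← hlist]; exact List.take_prefix m _
    rw [PySem.Str.isIn_eq]
    exact (PySem.Chars.exists_prefix_drop_iff_isIn _ _).mp ⟨j, hpre⟩
  · intro h
    rw [PySem.Str.isIn_eq] at h
    obtain ⟨j, hp⟩ := (PySem.Chars.exists_prefix_drop_iff_isIn _ _).mpr h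
    obtain ⟨r, hr⟩ := hp
    have hjlt : j < s.toList.length := by
      by_contra hge
      rw [List.drop_eq_nil_of_le (by omega)] at hr
      exact ht (List.append_eq_nil_iff.mp hr).1
    refine ⟨(j : Int), ?_, (t.toList.length : Int), hlen, ?_⟩
    · rw [PySem.List.mem_pyRange_one, PySem.Str.len_eq]
      constructor
      · exact Int.natCast_nonneg j
      · exact_mod_cast hjlt
    · have : (PySem.Str.slice s (some (j : Int)) (some ((j : Int) + (t.toList.length : Int)))).toList = t.toList := by
        rw [PySem.Str.toList_slice, PySem.Chars.slice_eq_listSlice, PySem.List.slice_natCast_add, ← hr]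
        exact List.take_left
      exact String.ext (by simpa [String.toList] using this)

-- membership in B's result set, characterised by per-token substring tests
theorem pvBMem (s x : String) :
    x ∈ ((PySem.List.pyRange 0 (PySem.Str.len s)).foldl
        (fun acc i =>
          pvLengths.foldl
            (fun acc length =>
              match pvTokenThemes.get? (PySem.Str.slice s (some i) (some (i + length))) with
              | some themes => PySem.Set.update acc themes
              | none => acc)
            acc)
        (PySem.Set.ofList ["crypto"])) ↔
      x = "crypto" ∨ ∃ p ∈ pvTTList, PySem.Str.isIn p.1 s = true ∧ x ∈ p.2 := by
  rw [pvMemFoldlScan (fun i L => pvTokenThemes.get? (PySem.Str.slice s (some i) (some (i + L))))]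
  simp only [PySem.Set.mem_ofList, List.mem_singleton]
  constructor
  · rintro (h | ⟨i, hi, L, hL, th, hg, hx⟩)
    · exact Or.inl h
    · have hmem := (pvLookupIff _ _).mp hg
      have hprops := pvTokProps _ hmem
      refine Or.inr ⟨_, hmem, ?_, hx⟩
      exact (pvSliceIff _ s hprops.1 hprops.2).mp ⟨i, hi, L, hL, rfl⟩
  · rintro (h | ⟨p, hp, hin, hx⟩)
    · exact Or.inl h
    · have hprops := pvTokProps _ hp
      obtain ⟨i, hi, L, hL, hsl⟩ := (pvSliceIff p.1 s hprops.1 hprops.2).mpr hin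
      refine Or.inr ⟨i, hi, L, hL, p.2, ?_, hx⟩
      rw [hsl]
      exact (pvLookupIff _ _).mpr hp

-- shape of A's themes list as a function of the six group booleans
set_option maxHeartbeats 2000000 in
theorem pvAShape (b1 b2 b3 b4 b5 b6 : Bool) (x : String) :
    (x ∈
      (let themes := ["crypto"]
       let themes := if b1 then themes ++ ["strong_narrative"] else themes
       let themes := if b2 then themes ++ ["crypto_infra"] else themes
       let themes := if b3 then themes ++ ["growth", "strong_narrative"] else themes
       let themes := if b4 then themes ++ ["ai_software"] else themes
       let themes := if b5 then themes ++ ["growth"] else themes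
       if (!(themes.contains "growth")) && b6 then themes ++ ["growth"] else themes)) ↔
      x = "crypto" ∨ (x = "strong_narrative" ∧ (b1 = true ∨ b3 = true)) ∨
        (x = "crypto_infra" ∧ b2 = true) ∨ (x = "ai_software" ∧ b4 = true) ∨
        (x = "growth" ∧ (b3 = true ∨ b5 = true ∨ b6 = true)) := by
  cases b1 <;> cases b2 <;> cases b3 <;> cases b4 <;> cases b5 <;> cases b6 <;>
    simp <;> tauto

-- regrouping the per-token disjunction by theme
set_option maxHeartbeats 4000000 in
theorem pvRegroup (s x : String) :
    (∃ p ∈ pvTTList, PySem.Str.isIn p.1 s = true ∧ x ∈ p.2) ↔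
      (x = "strong_narrative" ∧
          ((["BTC", "BITCOIN"].any (fun token => PySem.Str.isIn token s)) = true ∨
           (["SOL", "SUI", "SEI", "APT", "TAO", "INJ", "FET", "RENDER", "RNDR", "AIOZ"].any (fun token => PySem.Str.isIn token s)) = true)) ∨
      (x = "crypto_infra" ∧
          (["ETH", "ETHEREUM", "LINK", "AAVE", "MKR", "ONDO", "ENA", "LDO"].any (fun token => PySem.Str.isIn token s)) = true) ∨
      (x = "ai_software" ∧
          (["TAO", "FET", "RENDER", "RNDR", "AIOZ", "ARKM"].any (fun token => PySem.Str.isIn token s)) = true) ∨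
      (x = "growth" ∧
          ((["SOL", "SUI", "SEI", "APT", "TAO", "INJ", "FET", "RENDER", "RNDR", "AIOZ"].any (fun token => PySem.Str.isIn token s)) = true ∨
           (["ARB", "OP", "TIA", "SUI", "SEI", "APT", "NEAR"].any (fun token => PySem.Str.isIn token s)) = true ∨
           (["SOL", "ETH", "BTC"].any (fun token => PySem.Str.isIn token s)) = true)) := by
  simp only [pvTTList, List.mem_cons, List.not_mem_nil, or_false, List.any_cons, List.any_nil,
    Bool.or_eq_true, Bool.false_eq_true, exists_eq_or_imp, exists_eq_left]
  constructor
  · rintro (⟨h, (rfl | rfl)⟩ | ⟨h, rfl⟩ | ⟨h, (rfl | rfl)⟩ | ⟨h, rfl⟩ | ⟨h, rfl⟩ | ⟨h, rfl⟩ | ⟨h, rfl⟩ |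
      ⟨h, rfl⟩ | ⟨h, rfl⟩ | ⟨h, rfl⟩ | ⟨h, (rfl | rfl)⟩ | ⟨h, (rfl | rfl)⟩ | ⟨h, (rfl | rfl)⟩ |
      ⟨h, (rfl | rfl)⟩ | ⟨h, (rfl | rfl | rfl)⟩ | ⟨h, (rfl | rfl)⟩ | ⟨h, (rfl | rfl | rfl)⟩ |
      ⟨h, (rfl | rfl | rfl)⟩ | ⟨h, (rfl | rfl | rfl)⟩ | ⟨h, (rfl | rfl | rfl)⟩ | ⟨h, rfl⟩ |
      ⟨h, rfl⟩ | ⟨h, rfl⟩ | ⟨h, rfl⟩ | ⟨h, rfl⟩) <;> simp at h ⊢ <;> tauto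
  · rintro (⟨rfl, (h | h)⟩ | ⟨rfl, h⟩ | ⟨rfl, h⟩ | ⟨rfl, (h | h | h)⟩) <;> simp at h ⊢ <;> tauto

-- ===== VERDICT (by name: the statement is the Claim_ definition above) =====
set_option maxHeartbeats 2000000 in
theorem infer_crypto_themes_py_spec : Claim_equal_infer_crypto_themes_py := by
  intro coin_id symbol name _
  unfold Spec_infer_crypto_themes_py infer_crypto_themes_py infer_crypto_themes_py_alt
  set s := PySem.Str.upper (coin_id ++ " " ++ symbol ++ " " ++ name)
  rw [PySem.List.sorted_id_eq_sorted_id_iff_perm]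
  rw [List.perm_ext_iff_of_nodup (PySem.Set.nodup_ofList _)
        (pvNodupFoldlScan (fun i L => pvTokenThemes.get? (PySem.Str.slice s (some i) (some (i + L)))) _ _
          (PySem.Set.nodup_ofList _))]
  intro x
  rw [PySem.Set.mem_ofList, pvBMem s x, pvRegroup s x, pvAShape]
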